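-- pv_equiv track=rewrite | github.com/Kiera38/elschooltgbot | src/tgbot/services/grades_fixer.py | fix_to4
-- ===== SOURCE A (Python) =====
-- def fix_to4(grades):
--     """Как можно исправить оценку до 4."""
--     results = []
--     count_5 = 0
--     while True:
--         new_grades = grades.copy()
--         added_grades = []
--         new_grades += [5] * count_5
--         added_grades += [5] * count_5
--         if get_mean_gr(new_grades) >= 3.5:
--             results.append(added_grades)
--             break
--         while get_mean_gr(new_grades) < 3.5:
--             new_grades.append(4)
--             added_grades.append(4)
--         results.append(added_grades)
--         count_5 += 1
--     return results
--
-- def get_mean_gr(grades):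
--     """Средняя оценка."""
--     if grades:
--         sum_grades = sum(grades)
--         return sum_grades / len(grades)
--     else:
--         return 0
-- ===== SOURCE B (Python) =====
-- def fix_to4(grades):
--     """Как можно исправить оценку до 4."""
--     n = len(grades)
--     if n == 0:
--         return [[4], [5]]
--     d = 7 * n - 2 * sum(grades)
--     c_max = max(0, -(-d // 3))  # smallest c >= 0 with mean(grades + [5]*c) >= 3.5
--     return [[5] * c + [4] * (d - 3 * c) for c in range(c_max)] + [[5] * c_max]
-- ===== Notes on version B (the rewrite author's own statement) =====
-- stated objective: alternative
-- what changed: Instead of simulating the grade-adding loops and recomputing the mean after every single appended grade, B solves the mean inequality 2*sum >= 7*len arithmetically: it computes the minimal fives-count in closed form and emits each row (c fives followed by d-3c fours) directly by a range comprehension.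
import Mathlib
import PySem

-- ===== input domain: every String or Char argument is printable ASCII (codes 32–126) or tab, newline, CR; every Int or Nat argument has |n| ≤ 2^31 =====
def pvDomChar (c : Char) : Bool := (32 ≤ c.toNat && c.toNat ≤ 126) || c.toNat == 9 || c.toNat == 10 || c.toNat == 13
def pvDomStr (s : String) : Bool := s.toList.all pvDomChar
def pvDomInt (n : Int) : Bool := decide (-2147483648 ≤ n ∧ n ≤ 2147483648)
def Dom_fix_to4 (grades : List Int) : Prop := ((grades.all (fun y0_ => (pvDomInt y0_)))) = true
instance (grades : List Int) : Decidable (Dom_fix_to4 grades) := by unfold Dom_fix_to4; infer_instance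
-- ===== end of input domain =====

-- B replaces A's simulate-and-recompute-the-mean loops by closed-form counts per row (alternative algorithm, same output).

-- ===== PORT A =====
-- `get_mean_gr(g) >= 3.5`, ported as the exact rational comparison: for nonempty g,
-- sum/len >= 3.5 ⟺ 7*len ≤ 2*sum (Python's float comparison agrees with the rational
-- one for every list length below 2^50); for empty g the mean is 0 < 3.5.
def meanGE35 (g : List Int) : Bool := !g.isEmpty && decide (7 * (g.length : Int) ≤ 2 * g.sum)

-- inner `while get_mean_gr(new_grades) < 3.5: new_grades.append(4); added_grades.append(4)`
def addFours (ng acc : List Int) : List Int × List Int :=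
  if meanGE35 ng then (ng, acc)
  else addFours (ng ++ [4]) (acc ++ [4])
termination_by (7 * (ng.length : Int) - 2 * ng.sum).toNat + (if ng.isEmpty then 1 else 0)
decreasing_by
  rename_i h
  simp only [meanGE35, Bool.and_eq_true, Bool.not_eq_true', decide_eq_true_iff, not_and, not_le] at h
  rcases List.eq_nil_or_concat ng with h0 | ⟨l, a, rfl⟩
  · subst h0; simp
  · have h2 := h (by simp)
    simp only [List.concat_eq_append] at h2 ⊢
    simp at h2 ⊢
    push_cast at h2 ⊢
    omega

-- outer `while True` of A, state = count_5 and results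
def outerLoop (grades : List Int) (c : Nat) (results : List (List Int)) : List (List Int) :=
  if meanGE35 (grades ++ List.replicate c (5:Int)) then results ++ [List.replicate c (5:Int)]
  else
    outerLoop grades (c+1)
      (results ++ [(addFours (grades ++ List.replicate c (5:Int)) (List.replicate c (5:Int))).2])
termination_by (7 * (grades.length : Int) - 2 * grades.sum - 3 * c).toNat
               + (if grades.length + c = 0 then 1 else 0)
decreasing_by
  rename_i h
  simp only [meanGE35, Bool.and_eq_true, Bool.not_eq_true', decide_eq_true_iff, not_and, not_le] at h
  by_cases hz : grades.length + c = 0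
  · have hg : grades = [] := List.eq_nil_of_length_eq_zero (by omega)
    have hc : c = 0 := by omega
    subst hg hc
    simp
  · have hne : grades ++ List.replicate c (5:Int) ≠ [] := by
      intro hcon
      rcases List.append_eq_nil_iff.mp hcon with ⟨h1, h2⟩
      have hc0 : c = 0 := by simpa using congrArg List.length h2
      simp [h1, hc0] at hz
    have h2 := h (List.isEmpty_eq_false_iff.mpr hne)
    simp only [List.length_append, List.sum_append, List.sum_replicate,
      List.length_replicate, nsmul_eq_mul] at h2
    push_cast at h2 ⊢
    omega

def fix_to4 (grades : List Int) : List (List Int) := outerLoop grades 0 []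

-- ===== PORT B =====
def fix_to4_alt (grades : List Int) : List (List Int) :=
  let n : Int := grades.length
  if n = 0 then [[4], [5]]
  else
    let d : Int := 7 * n - 2 * grades.sum
    let cmax : Int := max 0 (-(PySem.Int.floordiv (-d) 3))
    ((PySem.List.pyRange 0 cmax 1).map
        (fun c => List.replicate c.toNat (5:Int) ++ List.replicate (d - 3 * c).toNat 4))
      ++ [List.replicate cmax.toNat (5:Int)]

-- ===== PRECONDITION & SPEC =====
def Spec_fix_to4 (grades : List Int) (out : List (List Int)) : Prop := out = fix_to4_alt grades
instance (grades : List Int) (out : List (List Int)) : Decidable (Spec_fix_to4 grades out) := by unfold Spec_fix_to4; infer_instance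

-- ===== CLAIM (what is proved, stated in full; the proofs are below) =====
def Claim_equal_fix_to4 : Prop := ∀ (grades : List Int), Dom_fix_to4 grades → Spec_fix_to4 grades (fix_to4 grades)

-- ===== LEMMAS AND PROOFS =====

theorem addFours_eq (k : Nat) : ∀ (ng acc : List Int), ng ≠ [] →
    7 * (ng.length : Int) - 2 * ng.sum = (k : Int) →
    addFours ng acc = (ng ++ List.replicate k (4:Int), acc ++ List.replicate k (4:Int)) := by
  induction k with
  | zero =>
    intro ng acc hne hk
    rw [addFours]
    have : meanGE35 ng = true := by
      simp [meanGE35, List.isEmpty_iff, hne]; omega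
    simp [this]
  | succ k ih =>
    intro ng acc hne hk
    rw [addFours]
    have : meanGE35 ng = false := by
      simp [meanGE35, List.isEmpty_iff, hne]
      push_cast at hk ⊢
      omega
    rw [if_neg (by simp [this])]
    have h2 : addFours (ng ++ [4]) (acc ++ [4])
        = (ng ++ [4] ++ List.replicate k (4:Int), acc ++ [4] ++ List.replicate k (4:Int)) := by
      apply ih
      · simp
      · simp only [List.length_append, List.sum_append]
        push_cast at hk ⊢
        simp
        omega
    rw [h2]
    have hrep : ([4] : List Int) ++ List.replicate k (4:Int) = List.replicate (k+1) (4:Int) := by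
      simp [List.replicate_succ]
    simp only [List.append_assoc, hrep]

theorem outerLoop_eq (grades : List Int) (hne : grades ≠ [])
    (d cmax : Int)
    (hd : d = 7 * (grades.length : Int) - 2 * grades.sum)
    (hcm : cmax = max 0 (-(PySem.Int.floordiv (-d) 3))) :
    ∀ (t : Nat) (c : Nat), (c : Int) ≤ cmax → (cmax - c).toNat = t → ∀ results,
    outerLoop grades c results =
      results ++ ((PySem.List.pyRange c cmax 1).map
          (fun x => List.replicate x.toNat (5:Int) ++ List.replicate (d - 3 * x).toNat 4))
        ++ [List.replicate cmax.toNat (5:Int)] := by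
  have hq : PySem.Int.floordiv (-d) 3 = (-d) / 3 :=
    PySem.Int.floordiv_eq_ediv_of_pos (by norm_num)
  have hlen : 0 < grades.length := List.length_pos_iff.mpr hne
  -- cmax is the least nonnegative integer with d ≤ 3*cmax
  have hcm1 : 0 ≤ cmax := by rw [hcm]; exact le_max_left _ _
  have hcm2 : d ≤ 3 * cmax := by rw [hcm, hq]; omega
  have hcm3 : ∀ x : Int, 0 ≤ x → d ≤ 3 * x → cmax ≤ x := by
    intro x hx hdx; rw [hcm, hq]; omega
  intro t
  induction t with
  | zero =>
    intro c hc ht results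
    have hceq : (c : Int) = cmax := by omega
    rw [outerLoop]
    have hmean : meanGE35 (grades ++ List.replicate c (5:Int)) = true := by
      simp [meanGE35, List.isEmpty_iff, hne]
      push_cast
      omega
    rw [if_pos (by simp [hmean])]
    have : PySem.List.pyRange (c : Int) cmax 1 = [] :=
      PySem.List.pyRange_one_eq_nil (by omega)
    rw [this]
    have : cmax.toNat = c := by omega
    simp [this]
  | succ t ih =>
    intro c hc ht results
    have hclt : (c : Int) < cmax := by omega
    -- mean is still below 3.5: otherwise c would already satisfy d ≤ 3c, contradicting minimality
    have hlt : 2 * (grades.sum + 5 * (c:Int)) < 7 * ((grades.length : Int) + c) := by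
      by_contra hge
      have : cmax ≤ (c : Int) := hcm3 c (by positivity) (by omega)
      omega
    rw [outerLoop]
    have hmean : meanGE35 (grades ++ List.replicate c (5:Int)) = false := by
      simp [meanGE35, List.isEmpty_iff, hne]
      push_cast
      omega
    rw [if_neg (by simp [hmean])]
    have hadd : addFours (grades ++ List.replicate c (5:Int)) (List.replicate c (5:Int))
        = (grades ++ List.replicate c (5:Int) ++ List.replicate (d - 3 * c).toNat (4:Int),
           List.replicate c (5:Int) ++ List.replicate (d - 3 * c).toNat (4:Int)) := by
      apply addFours_eq
      · simp [hne]
      · simp only [List.length_append, List.sum_append, List.sum_replicate,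
          List.length_replicate, nsmul_eq_mul]
        push_cast
        omega
    rw [hadd]
    rw [ih (c+1) (by push_cast; omega) (by omega)]
    rw [PySem.List.pyRange_one_cons hclt]
    simp only [List.map_cons, List.append_assoc, List.cons_append, List.nil_append]
    push_cast
    simp

-- ===== VERDICT (by name: the statement is the Claim_ definition above) =====
theorem fix_to4_spec : Claim_equal_fix_to4 := by
  intro grades _
  unfold Spec_fix_to4 fix_to4 fix_to4_alt
  rcases List.eq_nil_or_concat grades with h0 | ⟨l, a, h⟩
  · subst h0
    -- unroll the two iterations on the empty list by hand
    rw [outerLoop]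
    rw [if_neg (by simp [meanGE35])]
    rw [addFours]
    rw [if_neg (by simp [meanGE35])]
    rw [addFours]
    rw [if_pos (by simp [meanGE35])]
    rw [outerLoop]
    rw [if_pos (by simp [meanGE35])]
    simp [List.replicate]
  · have hne : grades ≠ [] := by subst h; simp
    have hn0 : (grades.length : Int) ≠ 0 := by
      have := List.length_pos_iff.mpr hne; omega
    rw [if_neg hn0]
    have := outerLoop_eq grades hne
      (7 * (grades.length : Int) - 2 * grades.sum)
      (max 0 (-(PySem.Int.floordiv (-(7 * (grades.length : Int) - 2 * grades.sum)) 3)))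
      rfl rfl
      ((max 0 (-(PySem.Int.floordiv (-(7 * (grades.length : Int) - 2 * grades.sum)) 3)) - 0).toNat)
      0 ?_ ?_ []
    · simpa using this
    · exact le_max_left _ _
    · rfl
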